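-- pv_equiv track=rewrite | github.com/TOLAAJAO/cmpsc-132 | Spring 2026 work/Homework 1/HW1.py | has_hoagie
-- ===== SOURCE A (Python) =====
-- def has_hoagie(num):
--     """
--         >>> has_hoagie(737)
--         True
--         >>> has_hoagie(35)
--         False
--         >>> has_hoagie(-6060)
--         True
--         >>> has_hoagie(-111)
--         True
--         >>> has_hoagie(6945)
--         False
--     """
--     if num < 0:
--         num = -num
--     if num < 100:
--         return False
--     right = num % 10
--     num //= 10
--     middle = num % 10
--     num //= 10
--     while num > 0:
--         left = num % 10
--         if left == right:
--             return True
--         right = middle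
--         middle = left
--         num //= 10
--     return False
-- ===== SOURCE B (Python) =====
-- def has_hoagie(num):
--     s = str(abs(num))
--     return any(s[i] == s[i + 2] for i in range(len(s) - 2))
-- ===== Notes on version B (the rewrite author's own statement) =====
-- stated objective: idiomatic
-- what changed: Replaces integer-arithmetic digit peeling with a three-variable sliding window by converting the number to its decimal string once and scanning it with any(s[i] == s[i+2]).
import Mathlib
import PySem

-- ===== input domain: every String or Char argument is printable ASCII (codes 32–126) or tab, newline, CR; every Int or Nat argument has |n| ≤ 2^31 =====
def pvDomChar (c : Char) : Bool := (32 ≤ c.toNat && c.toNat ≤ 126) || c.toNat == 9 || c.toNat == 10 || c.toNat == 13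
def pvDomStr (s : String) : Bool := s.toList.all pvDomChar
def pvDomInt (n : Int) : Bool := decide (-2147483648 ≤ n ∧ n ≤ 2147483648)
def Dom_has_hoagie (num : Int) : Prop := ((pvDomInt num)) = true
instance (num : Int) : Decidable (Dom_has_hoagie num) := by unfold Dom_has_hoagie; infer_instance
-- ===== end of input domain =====

-- B converts the number to its decimal string once and scans it by index (s[i] == s[i+2])
-- instead of A's integer-arithmetic digit peeling with a three-variable sliding window; same cost, more idiomatic.

-- ===== PORT A =====
-- the 'while num > 0' loop of A, state = (num, right, middle)
def hoagieLoop (num right middle : Int) : Bool :=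
  if _h : 0 < num then
    let left := PySem.Int.mod num 10
    if left == right then true
    else hoagieLoop (PySem.Int.floordiv num 10) middle left
  else false
termination_by num.toNat
decreasing_by
  simp only [PySem.Int.floordiv_eq_ediv_of_pos (by norm_num : (0:ℤ) < 10)]
  omega

def has_hoagie (num : Int) : Bool :=
  let num := if num < 0 then -num else num
  if num < 100 then false
  else
    let right := PySem.Int.mod num 10
    let num1 := PySem.Int.floordiv num 10
    let middle := PySem.Int.mod num1 10
    let num2 := PySem.Int.floordiv num1 10
    hoagieLoop num2 right middle

-- ===== PORT B =====
def has_hoagie_alt (num : Int) : Bool :=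
  let s := PySem.Int.toChars (if num < 0 then -num else num)   -- str(abs(num)) as a char list
  (List.range (s.length - 2)).any
    (fun i => PySem.List.pyGet? s (i : Int) == PySem.List.pyGet? s ((i : Int) + 2))

-- ===== PRECONDITION & SPEC =====
def Spec_has_hoagie (num : Int) (out : Bool) : Prop := out = has_hoagie_alt num
instance (num : Int) (out : Bool) : Decidable (Spec_has_hoagie num out) := by unfold Spec_has_hoagie; infer_instance

-- ===== CLAIM (what is proved, stated in full; the proofs are below) =====
def Claim_equal_has_hoagie : Prop := ∀ (num : Int), Dom_has_hoagie num → Spec_has_hoagie num (has_hoagie num)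

-- ===== LEMMAS AND PROOFS =====

-- "some digit equals the digit two positions later" for an arbitrary list
def HoagieP {α : Type} (L : List α) : Prop := ∃ i, i + 2 < L.length ∧ L[i]? = L[i + 2]?

theorem hoagieP_short {α : Type} (L : List α) (h : L.length < 3) : ¬ HoagieP L := by
  rintro ⟨i, hi, -⟩; omega

theorem hoagieP_cons3 {α : Type} (a b c : α) (T : List α) :
    HoagieP (a :: b :: c :: T) ↔ a = c ∨ HoagieP (b :: c :: T) := by
  constructor
  · rintro ⟨i, hi, he⟩
    cases i with
    | zero => left; simpa using he
    | succ i' =>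
      right
      refine ⟨i', by simp at hi ⊢; omega, ?_⟩
      simpa using he
  · rintro (h | ⟨i, hi, he⟩)
    · exact ⟨0, by simp, by simp [h]⟩
    · exact ⟨i + 1, by simp at hi ⊢; omega, by simpa using he⟩

theorem hoagieP_of_reverse {α : Type} (L : List α) (h : HoagieP L.reverse) : HoagieP L := by
  obtain ⟨i, hi, he⟩ := h
  rw [List.length_reverse] at hi
  rw [List.getElem?_reverse (by omega), List.getElem?_reverse (by omega)] at he
  refine ⟨L.length - 3 - i, by omega, ?_⟩
  rw [show L.length - 1 - (i + 2) = L.length - 3 - i from by omega] at he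
  rw [show L.length - 3 - i + 2 = L.length - 1 - i from by omega]
  exact he.symm

theorem hoagieP_reverse {α : Type} (L : List α) : HoagieP L.reverse ↔ HoagieP L := by
  constructor
  · exact hoagieP_of_reverse L
  · intro h
    exact hoagieP_of_reverse L.reverse (by simpa using h)

theorem hoagieP_map {α β : Type} (f : α → β) (L : List α)
    (hinj : ∀ a ∈ L, ∀ b ∈ L, f a = f b → a = b) :
    HoagieP (L.map f) ↔ HoagieP L := by
  constructor
  · rintro ⟨i, hi, he⟩
    rw [List.length_map] at hi
    refine ⟨i, hi, ?_⟩
    rw [List.getElem?_map, List.getElem?_map] at he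
    rw [List.getElem?_eq_getElem (by omega), List.getElem?_eq_getElem hi] at he ⊢
    simp only [Option.map_some, Option.some.injEq] at he ⊢
    exact hinj _ (List.getElem_mem _) _ (List.getElem_mem _) he
  · rintro ⟨i, hi, he⟩
    refine ⟨i, by rw [List.length_map]; exact hi, ?_⟩
    rw [List.getElem?_map, List.getElem?_map, he]

-- B's indexed any-scan decides HoagieP
theorem hoagie_any_iff (L : List Char) :
    ((List.range (L.length - 2)).any
      (fun i => PySem.List.pyGet? L (i : Int) == PySem.List.pyGet? L ((i : Int) + 2)) = true)
      ↔ HoagieP L := by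
  rw [List.any_eq_true]
  constructor
  · rintro ⟨i, hmem, hp⟩
    rw [List.mem_range] at hmem
    rw [show ((i : Int) + 2) = ((i + 2 : ℕ) : Int) from by push_cast; ring,
        PySem.List.pyGet?_natCast, PySem.List.pyGet?_natCast, beq_iff_eq] at hp
    exact ⟨i, by omega, hp⟩
  · rintro ⟨i, hi, he⟩
    refine ⟨i, List.mem_range.mpr (by omega), ?_⟩
    rw [show ((i : Int) + 2) = ((i + 2 : ℕ) : Int) from by push_cast; ring,
        PySem.List.pyGet?_natCast, PySem.List.pyGet?_natCast, beq_iff_eq]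
    exact he

-- Nat.toDigits (what str(n) prints) is the reversed digitChar image of Nat.digits
theorem toDigitsCore_digits (f : ℕ) : ∀ (n : ℕ) (l : List Char), 0 < n → n < f →
    Nat.toDigitsCore 10 f n l = ((Nat.digits 10 n).map Nat.digitChar).reverse ++ l := by
  induction f with
  | zero => intro n l h0 hf; omega
  | succ f ih =>
    intro n l h0 hf
    rw [Nat.toDigitsCore]
    by_cases hdiv : n / 10 = 0
    · rw [if_pos hdiv, Nat.digits_def' (by norm_num : 1 < 10) h0, hdiv]
      simp
    · rw [if_neg hdiv]
      have hlt : n / 10 < n := Nat.div_lt_self h0 (by norm_num)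
      rw [ih (n / 10) (Nat.digitChar (n % 10) :: l) (Nat.pos_of_ne_zero hdiv) (by omega)]
      rw [Nat.digits_def' (by norm_num : 1 < 10) h0]
      simp

theorem toDigits_digits (n : ℕ) (h : 0 < n) :
    Nat.toDigits 10 n = ((Nat.digits 10 n).map Nat.digitChar).reverse := by
  rw [Nat.toDigits, toDigitsCore_digits (n + 1) n [] h (by omega)]
  simp

theorem digitChar_inj : ∀ d < 10, ∀ e < 10, Nat.digitChar d = Nat.digitChar e → d = e := by
  decide

-- A's loop decides HoagieP on right :: middle :: remaining digits (least-significant first)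
theorem hoagieLoop_eq (n : ℕ) : ∀ r m : Int,
    (hoagieLoop (n : Int) r m = true) ↔
      HoagieP (r :: m :: (Nat.digits 10 n).map (fun d : ℕ => (d : Int))) := by
  induction n using Nat.strong_induction_on with
  | _ n ih =>
    intro r m
    rw [hoagieLoop]
    by_cases h0 : 0 < n
    · rw [dif_pos (by exact_mod_cast h0)]
      rw [show (10 : Int) = ((10 : ℕ) : Int) from rfl, PySem.Int.mod_natCast,
          PySem.Int.floordiv_natCast]
      rw [Nat.digits_def' (by norm_num : 1 < 10) h0]
      rw [List.map_cons, hoagieP_cons3]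
      by_cases heq : ((n % 10 : ℕ) : Int) = r
      · simp [heq]
      · rw [if_neg (by simpa using heq)]
        rw [ih (n / 10) (Nat.div_lt_self h0 (by norm_num)) m ((n % 10 : ℕ) : Int)]
        constructor
        · exact Or.inr
        · rintro (h | h)
          · exact absurd h.symm heq
          · exact h
    · have hn : n = 0 := by omega
      subst hn
      rw [dif_neg (by simp)]
      simp only [Nat.digits_zero]
      constructor
      · intro h; exact absurd h (by simp)
      · intro h; exact absurd h (hoagieP_short _ (by simp))

theorem abs_branch (num : Int) : (if num < 0 then -num else num) = ((num.natAbs : ℕ) : Int) := by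
  split <;> omega

theorem toChars_natCast (n : ℕ) : PySem.Int.toChars ((n : ℕ) : Int) = Nat.toDigits 10 n := by
  rw [PySem.Int.toChars, if_neg (by omega)]
  simp

-- ===== VERDICT (by name: the statement is the Claim_ definition above) =====
theorem has_hoagie_spec : Claim_equal_has_hoagie := by
  intro num _
  show has_hoagie num = has_hoagie_alt num
  rw [has_hoagie, has_hoagie_alt]
  simp only [abs_branch num, toChars_natCast]
  set n : ℕ := num.natAbs with hn
  by_cases hsmall : n < 100
  · rw [if_pos (by exact_mod_cast hsmall)]
    have hlen : (Nat.toDigits 10 n).length ≤ 2 :=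
      Nat.toDigits_length 10 n 2 (by norm_num) (by norm_num; omega)
    rw [show (Nat.toDigits 10 n).length - 2 = 0 from by omega]
    simp
  · rw [if_neg (by exact_mod_cast hsmall)]
    have h0 : 0 < n := by omega
    have h1 : 0 < n / 10 := by omega
    -- A's side
    rw [show (10 : Int) = ((10 : ℕ) : Int) from rfl, PySem.Int.mod_natCast,
        PySem.Int.floordiv_natCast, PySem.Int.mod_natCast, PySem.Int.floordiv_natCast]
    rw [Bool.eq_iff_iff, hoagieLoop_eq, hoagie_any_iff]
    -- rewrite B's char list to digit form
    rw [toDigits_digits n h0, hoagieP_reverse,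
        hoagieP_map Nat.digitChar _
          (fun a ha b hb h => digitChar_inj a (Nat.digits_lt_base (by norm_num) ha)
            b (Nat.digits_lt_base (by norm_num) hb) h)]
    -- rewrite A's list to digit form
    rw [show (((n % 10 : ℕ) : Int) :: ((n / 10 % 10 : ℕ) : Int) ::
          List.map (fun d : ℕ => (d : Int)) (Nat.digits 10 (n / 10 / 10)))
        = List.map (fun d : ℕ => (d : Int)) (n % 10 :: n / 10 % 10 :: Nat.digits 10 (n / 10 / 10))
        from by simp,
       hoagieP_map (fun d : ℕ => (d : Int)) _ (fun a _ b _ h => by simpa using h),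
       Nat.digits_def' (by norm_num : 1 < 10) h0, Nat.digits_def' (by norm_num : 1 < 10) h1]
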